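-- pv_equiv track=rewrite | github.com/petrlos/AoC_2018 | 22/22.py | generateErosions
-- ===== SOURCE A (Python) =====
-- def getErosion(geologicalIndex, depth):
--     return (geologicalIndex + depth) % 20183
--
-- def generateErosions(target, depth):
--     map = {}
--     map.setdefault((0,0), getErosion(0, depth))
--     xMax = 1
--     while target not in map.keys():
--         for x in range(xMax, -1, -1):
--             y = xMax - x
--             if x == 0:
--                 geologicalIndex = y * 48271
--             elif y == 0:
--                 geologicalIndex = x * 16807
--             else:
--                 geologicalIndex = map[x-1, y] * map[x, y-1]
--             erosion = getErosion(geologicalIndex, depth)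
--             map.setdefault((x,y), erosion)
--         xMax += 1
--     map[target] = getErosion(0, depth) #coordinates of target have geologicalIndex = 0
--     return map
-- ===== SOURCE B (Python) =====
-- def generateErosions(target, depth):
--     # Two staged passes instead of A's grow-until-found dict loop: first a
--     # row-major triangular 2D grid of erosion levels (plain nested lists, no
--     # dict during computation), then emit the result dict anti-diagonal by
--     # anti-diagonal with the target cell overridden (its geologicalIndex is 0).
--     tx, ty = target
--     D = tx + ty
--     grid = []
--     for x in range(D + 1):
--         row = []
--         for y in range(D - x + 1):
--             if x == 0:
--                 gi = y * 48271
--             elif y == 0: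
--                 gi = x * 16807
--             else:
--                 gi = grid[x - 1][y] * row[y - 1]
--             row.append((gi + depth) % 20183)
--         grid.append(row)
--     out = {}
--     for k in range(D + 1):
--         for x in range(k, -1, -1):
--             y = k - x
--             out[(x, y)] = depth % 20183 if (x, y) == target else grid[x][y]
--     return out
-- ===== Notes on version B (the rewrite author's own statement) =====
-- stated objective: alternative
-- what changed: B replaces A's grow-the-dict-until-the-target-appears while loop by two staged passes: a row-major fill of a triangular 2D list (grid[x][y], no dict at all during computation), then a separate emission pass that writes the output dict with the target cell overridden.
import Mathlib
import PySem

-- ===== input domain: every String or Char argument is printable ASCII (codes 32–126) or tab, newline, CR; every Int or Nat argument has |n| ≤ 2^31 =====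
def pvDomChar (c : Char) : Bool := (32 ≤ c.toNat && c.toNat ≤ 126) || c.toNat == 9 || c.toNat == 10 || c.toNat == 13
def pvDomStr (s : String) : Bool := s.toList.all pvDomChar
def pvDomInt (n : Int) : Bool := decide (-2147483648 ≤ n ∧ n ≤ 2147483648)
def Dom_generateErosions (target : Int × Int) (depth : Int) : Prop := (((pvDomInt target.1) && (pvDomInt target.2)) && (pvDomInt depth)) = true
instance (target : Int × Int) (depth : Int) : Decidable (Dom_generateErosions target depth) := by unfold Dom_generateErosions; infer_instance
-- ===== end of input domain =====

-- B replaces A's grow-until-the-target-appears dict loop by two staged passes: a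
-- row-major fill of a triangular 2D list, then an emission pass writing the dict.

-- ===== PORT A =====
def getErosionA (geologicalIndex : Int) (depth : Int) : Int :=
  PySem.Int.mod (geologicalIndex + depth) 20183

-- body of A's inner `for x in range(xMax, -1, -1)` loop
def pvABody (depth xMax : Int) (m : PySem.Dict (Int × Int) Int) (x : Int) : PySem.Dict (Int × Int) Int :=
  let y := xMax - x
  let geologicalIndex :=
    if x = 0 then y * 48271
    else if y = 0 then x * 16807
    -- `map[x-1,y]` / `map[x,y-1]`: KeyError impossible, the neighbours lie on the previous, completed diagonal
    else ((m.get? (x - 1, y)).getD 0) * ((m.get? (x, y - 1)).getD 0)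
  let erosion := getErosionA geologicalIndex depth
  m.setdefault (x, y) erosion

-- A's `while target not in map.keys()` loop; fuel only makes the recursion total:
-- with both target coordinates nonnegative (Pre_) the loop exits before fuel runs out,
-- and on other inputs the Python loops forever (excluded by Pre_).
def pvALoop (target : Int × Int) (depth : Int) : Nat → Int → PySem.Dict (Int × Int) Int → PySem.Dict (Int × Int) Int
  | 0, _, m => m
  | fuel + 1, xMax, m =>
    if m.contains target then m
    else pvALoop target depth fuel (xMax + 1) ((PySem.List.pyRange xMax (-1) (-1)).foldl (pvABody depth xMax) m)

def generateErosions (target : Int × Int) (depth : Int) : List (Int × Int × Int) :=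
  let m0 := (PySem.Dict.empty : PySem.Dict (Int × Int) Int).setdefault (0, 0) (getErosionA 0 depth)
  let m := pvALoop target depth ((target.1 + target.2).toNat + 1) 1 m0
  let m := m.insert target (getErosionA 0 depth)
  m.items.map (fun p => (p.1.1, p.1.2, p.2))

-- ===== PORT B =====
-- body of B's inner `for y in range(D - x + 1)` loop (grid, x are the captured outer state)
def pvBRowBody (depth : Int) (grid : List (List Int)) (x : Int) (row : List Int) (y : Int) : List Int :=
  let gi :=
    if x = 0 then y * 48271
    else if y = 0 then x * 16807
    -- `grid[x-1][y]` / `row[y-1]`: IndexError impossible, the previous row is one longer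
    else ((PySem.List.pyGet? ((PySem.List.pyGet? grid (x - 1)).getD []) y).getD 0)
         * ((PySem.List.pyGet? row (y - 1)).getD 0)
  row ++ [PySem.Int.mod (gi + depth) 20183]

-- body of B's `for x in range(D + 1)` loop building the 2D grid
def pvBGridBody (depth DInt : Int) (grid : List (List Int)) (x : Int) : List (List Int) :=
  grid ++ [(PySem.List.pyRange 0 (DInt - x + 1) 1).foldl (pvBRowBody depth grid x) []]

-- body of B's emission loop `for k in range(D + 1): for x in range(k, -1, -1): out[(x, y)] = ...`
def pvBOutBody (target : Int × Int) (depth : Int) (grid : List (List Int))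
    (out : PySem.Dict (Int × Int) Int) (k : Int) : PySem.Dict (Int × Int) Int :=
  (PySem.List.pyRange k (-1) (-1)).foldl
    (fun (out : PySem.Dict (Int × Int) Int) x =>
      let y := k - x
      out.insert (x, y)
        (if (x, y) = target then PySem.Int.mod depth 20183
         else (PySem.List.pyGet? ((PySem.List.pyGet? grid x).getD []) y).getD 0))
    out

def generateErosions_alt (target : Int × Int) (depth : Int) : List (Int × Int × Int) :=
  let D := target.1 + target.2
  let grid := (PySem.List.pyRange 0 (D + 1) 1).foldl (pvBGridBody depth D) []
  let out := (PySem.List.pyRange 0 (D + 1) 1).foldl (pvBOutBody target depth grid) PySem.Dict.empty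
  out.items.map (fun p => (p.1.1, p.1.2, p.2))

-- ===== PRECONDITION & SPEC =====
-- Pre_ excludes targets with a negative coordinate: there A's while loop never finds
-- the target in the dict and the Python loops forever (no return value).
def Pre_generateErosions (target : Int × Int) (depth : Int) : Prop :=
  0 ≤ target.1 ∧ 0 ≤ target.2
instance (target : Int × Int) (depth : Int) : Decidable (Pre_generateErosions target depth) := by unfold Pre_generateErosions; infer_instance

def pvWitness_generateErosions : (Int × Int) × Int := ((2, 1), 510)

def Spec_generateErosions (target : Int × Int) (depth : Int) (out : List (Int × Int × Int)) : Prop := out = generateErosions_alt target depth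
instance (target : Int × Int) (depth : Int) (out : List (Int × Int × Int)) : Decidable (Spec_generateErosions target depth out) := by unfold Spec_generateErosions; infer_instance

-- ===== CLAIM (what is proved, stated in full; the proofs are below) =====
def Claim_equal_generateErosions : Prop := ∀ (target : Int × Int) (depth : Int), Dom_generateErosions target depth → Pre_generateErosions target depth → Spec_generateErosions target depth (generateErosions target depth)

-- ===== LEMMAS AND PROOFS =====

def pvE (depth : Int) : Nat → Nat → Int
  | 0, y => PySem.Int.mod ((y : Int) * 48271 + depth) 20183
  | x + 1, 0 => PySem.Int.mod (((x : Int) + 1) * 16807 + depth) 20183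
  | x + 1, y + 1 => PySem.Int.mod (pvE depth x (y + 1) * pvE depth (x + 1) y + depth) 20183
termination_by x y => x + y

-- the dict entry recorded for cell (x, k - x)
def pvEnt (depth : Int) (k x : Nat) : (Int × Int) × Int := (((x : Int), ((k - x : Nat) : Int)), pvE depth x (k - x))

-- the entries of anti-diagonal k for x = k, k-1, …, k-j (a prefix of the diagonal)
def pvSeg (depth : Int) (k : Nat) : Nat → List ((Int × Int) × Int)
  | 0 => [pvEnt depth k k]
  | j + 1 => pvSeg depth k j ++ [pvEnt depth k (k - (j + 1))]

-- all entries recorded after the diagonals 0, 1, …, K, in insertion order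
def pvUpTo (depth : Int) : Nat → List ((Int × Int) × Int)
  | 0 => [pvEnt depth 0 0]
  | K + 1 => pvUpTo depth K ++ pvSeg depth (K + 1) (K + 1)

-- the entries of the diagonals strictly below K
def pvBelow (depth : Int) : Nat → List ((Int × Int) × Int)
  | 0 => []
  | K + 1 => pvUpTo depth K

theorem mem_pvSeg {depth : Int} {k : Nat} {p : (Int × Int) × Int} {j : Nat} (hj : j ≤ k) :
    p ∈ pvSeg depth k j ↔ ∃ x, x ≤ k ∧ k - j ≤ x ∧ p = pvEnt depth k x := by
  induction j with
  | zero =>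
    simp only [pvSeg, List.mem_singleton]
    constructor
    · rintro rfl; exact ⟨k, le_rfl, by omega, rfl⟩
    · rintro ⟨x, hx, hlo, rfl⟩
      have : x = k := by omega
      rw [this]
  | succ j ih =>
    have hj' : j ≤ k := by omega
    simp only [pvSeg, List.mem_append, List.mem_singleton, ih hj']
    constructor
    · rintro (⟨x, hx, hlo, rfl⟩ | rfl)
      · exact ⟨x, hx, by omega, rfl⟩
      · exact ⟨k - (j + 1), by omega, by omega, rfl⟩
    · rintro ⟨x, hx, hlo, rfl⟩
      by_cases hc : k - j ≤ x
      · exact Or.inl ⟨x, hx, hc, rfl⟩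
      · right
        have : x = k - (j + 1) := by omega
        rw [this]

theorem mem_pvUpTo {depth : Int} {K : Nat} {p : (Int × Int) × Int} :
    p ∈ pvUpTo depth K ↔ ∃ x y, x + y ≤ K ∧ p = pvEnt depth (x + y) x := by
  induction K with
  | zero =>
    simp only [pvUpTo, List.mem_singleton]
    constructor
    · rintro rfl; exact ⟨0, 0, le_rfl, rfl⟩
    · rintro ⟨x, y, hxy, rfl⟩
      have hx : x = 0 := by omega
      have hy : y = 0 := by omega
      rw [hx, hy]
  | succ K ih =>
    simp only [pvUpTo, List.mem_append, ih, mem_pvSeg (le_rfl : K + 1 ≤ K + 1)]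
    constructor
    · rintro (⟨x, y, hxy, rfl⟩ | ⟨x, hx, _, rfl⟩)
      · exact ⟨x, y, by omega, rfl⟩
      · refine ⟨x, K + 1 - x, by omega, ?_⟩
        rw [Nat.add_sub_cancel' hx]
    · rintro ⟨x, y, hxy, rfl⟩
      by_cases hc : x + y ≤ K
      · exact Or.inl ⟨x, y, hc, rfl⟩
      · right
        have hxy' : x + y = K + 1 := by omega
        exact ⟨x, by omega, by omega, by rw [hxy']⟩

theorem mem_pvBelow {depth : Int} {K : Nat} {p : (Int × Int) × Int} :
    p ∈ pvBelow depth K ↔ ∃ x y, x + y < K ∧ p = pvEnt depth (x + y) x := by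
  cases K with
  | zero => simp [pvBelow]
  | succ K =>
    simp only [pvBelow, mem_pvUpTo]
    constructor
    · rintro ⟨x, y, h, rfl⟩; exact ⟨x, y, by omega, rfl⟩
    · rintro ⟨x, y, h, rfl⟩; exact ⟨x, y, by omega, rfl⟩

theorem get?_mk_append {κ ν : Type} [BEq κ] (l1 l2 : List (κ × ν)) (k : κ) :
    (PySem.Dict.mk (l1 ++ l2)).get? k = ((PySem.Dict.mk l1).get? k).or ((PySem.Dict.mk l2).get? k) := by
  simp only [PySem.Dict.get?, List.find?_append]
  cases List.find? (fun p => p.1 == k) l1 <;> simp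

theorem nodup_keys_seg (depth : Int) {k j : Nat} (hj : j ≤ k) :
    ((pvSeg depth k j).map (·.1)).Nodup := by
  induction j with
  | zero => simp [pvSeg]
  | succ j ih =>
    have hj' : j ≤ k := by omega
    simp only [pvSeg, List.map_append, List.map_cons, List.map_nil]
    rw [List.nodup_append]
    refine ⟨ih hj', List.nodup_singleton _, ?_⟩
    intro q hq q' hq'
    simp only [List.mem_map] at hq
    obtain ⟨p, hp, rfl⟩ := hq
    rw [List.mem_singleton] at hq'
    subst hq'
    obtain ⟨x, hx, hlo, hpx⟩ := (mem_pvSeg hj').mp hp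
    rw [hpx]
    simp only [pvEnt, ne_eq, Prod.mk.injEq, Nat.cast_inj]
    omega

theorem nodup_keys_upTo {depth : Int} (K : Nat) : ((pvUpTo depth K).map (·.1)).Nodup := by
  induction K with
  | zero => simp [pvUpTo]
  | succ K ih =>
    simp only [pvUpTo, List.map_append]
    rw [List.nodup_append]
    refine ⟨ih, nodup_keys_seg depth le_rfl, ?_⟩
    intro q hq q' hq'
    simp only [List.mem_map] at hq hq'
    obtain ⟨p, hp, rfl⟩ := hq
    obtain ⟨p', hp', rfl⟩ := hq'
    obtain ⟨x, y, hxy, hpe⟩ := mem_pvUpTo.mp hp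
    obtain ⟨x', hx', _, hpe'⟩ := (mem_pvSeg le_rfl).mp hp'
    rw [hpe, hpe']
    simp only [pvEnt, ne_eq, Prod.mk.injEq, Nat.cast_inj]
    omega

theorem nodup_keys_mk_upTo {depth : Int} (K : Nat) :
    (PySem.Dict.mk (pvUpTo depth K)).keys.Nodup := by
  simp only [PySem.Dict.keys]
  exact nodup_keys_upTo K

theorem get?_upTo {depth : Int} {K x y : Nat} (h : x + y ≤ K) :
    (PySem.Dict.mk (pvUpTo depth K)).get? ((x : Int), (y : Int)) = some (pvE depth x y) := by
  rw [PySem.Dict.get?_eq_some_iff_mem_items _ _ _ (nodup_keys_mk_upTo K)]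
  show _ ∈ pvUpTo depth K
  rw [mem_pvUpTo]
  exact ⟨x, y, h, by simp [pvEnt, Nat.add_sub_cancel_left]⟩

theorem get?_upTo_none {depth : Int} {K : Nat} {p : Int × Int}
    (h : ∀ x y : Nat, x + y ≤ K → p ≠ ((x : Int), (y : Int))) :
    (PySem.Dict.mk (pvUpTo depth K)).get? p = none := by
  rw [PySem.Dict.get?_eq_none_iff_not_mem_keys]
  simp only [PySem.Dict.keys, List.mem_map]
  rintro ⟨q, hq, rfl⟩
  obtain ⟨x, y, hxy, rfl⟩ := mem_pvUpTo.mp hq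
  exact h x y hxy (by simp [pvEnt, Nat.add_sub_cancel_left])

theorem get?_seg_none {depth : Int} {k j : Nat} {p : Int × Int} (hj : j ≤ k)
    (h : ∀ x : Nat, x ≤ k → k - j ≤ x → p ≠ ((x : Int), ((k - x : Nat) : Int))) :
    (PySem.Dict.mk (pvSeg depth k j)).get? p = none := by
  rw [PySem.Dict.get?_eq_none_iff_not_mem_keys]
  simp only [PySem.Dict.keys, List.mem_map]
  rintro ⟨q, hq, rfl⟩
  obtain ⟨x, hx, hlo, rfl⟩ := (mem_pvSeg hj).mp hq
  exact h x hx hlo rfl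

theorem pv_getD_lookup {depth : Int} {K j x y : Nat} (hxy : x + y ≤ K) :
    ((PySem.Dict.mk (pvUpTo depth K ++ pvSeg depth (K + 1) j)).get? ((x : Int), (y : Int))).getD 0 = pvE depth x y := by
  rw [get?_mk_append, get?_upTo hxy]
  rfl

theorem pv_fresh {depth : Int} {K t : Nat} (ht : t ≤ K) :
    (PySem.Dict.mk (pvUpTo depth K ++ pvSeg depth (K + 1) (K - t))).contains ((t : Int), ((K + 1 - t : Nat) : Int)) = false := by
  rw [PySem.Dict.contains_eq_isSome_get?, get?_mk_append]
  rw [get?_upTo_none, get?_seg_none (by omega)]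
  · rfl
  · intro x hx hlo h
    simp only [Prod.mk.injEq, Nat.cast_inj] at h
    omega
  · intro x y hxy h
    simp only [Prod.mk.injEq, Nat.cast_inj] at h
    omega

theorem pv_body_zero {depth : Int} (K : Nat) :
    pvABody depth ((K : Int) + 1) (PySem.Dict.mk (pvUpTo depth K ++ pvSeg depth (K + 1) K)) 0
      = PySem.Dict.mk (pvUpTo depth (K + 1)) := by
  have hfresh := pv_fresh (depth := depth) (K := K) (Nat.zero_le K)
  have hkey : (((0:Nat) : Int), ((K + 1 - 0 : Nat) : Int)) = ((0:Int), (K : Int) + 1 - 0) := by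
    push_cast; norm_num
  rw [hkey, Nat.sub_zero] at hfresh
  simp only [pvABody, if_pos (rfl : (0:Int) = 0)]
  simp only [PySem.Dict.setdefault, hfresh, if_neg (Bool.false_ne_true)]
  simp only [if_true, PySem.Dict.mk.injEq, pvUpTo, List.append_assoc]
  congr 1
  conv_rhs => rw [pvSeg]
  congr 2
  simp [pvEnt, Nat.sub_self]
  simp only [getErosionA, pvE]
  congr 1

theorem pv_body_succ {depth : Int} (K t : Nat) (ht : t + 1 ≤ K) :
    pvABody depth ((K : Int) + 1) (PySem.Dict.mk (pvUpTo depth K ++ pvSeg depth (K + 1) (K - (t + 1)))) ((t : Int) + 1)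
      = PySem.Dict.mk (pvUpTo depth K ++ pvSeg depth (K + 1) (K - t)) := by
  have hy : (K : Int) + 1 - ((t : Int) + 1) = ((K - t : Nat) : Int) := by omega
  have hx1 : (t : Int) + 1 - 1 = ((t : Nat) : Int) := by omega
  have hx2 : (t : Int) + 1 = (((t + 1 : Nat)) : Int) := by omega
  have hy1 : ((K - t : Nat) : Int) - 1 = ((K - t - 1 : Nat) : Int) := by omega
  simp only [pvABody]
  rw [if_neg (by omega : ¬ ((t : Int) + 1 = 0))]
  rw [hy, if_neg (by omega : ¬ (((K - t : Nat) : Int) = 0))]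
  rw [hx1, hy1, hx2]
  rw [pv_getD_lookup (by omega : t + (K - t) ≤ K), pv_getD_lookup (by omega : (t + 1) + (K - t - 1) ≤ K)]
  have hfresh := pv_fresh (depth := depth) (K := K) (t := t + 1) ht
  have hk2 : ((K + 1 - (t + 1) : Nat) : Int) = ((K - t : Nat) : Int) := by omega
  rw [hk2] at hfresh
  simp only [PySem.Dict.setdefault, hfresh, if_neg (Bool.false_ne_true)]
  simp only [PySem.Dict.mk.injEq, List.append_assoc]
  congr 1
  have hKt : K - t = (K - (t + 1)) + 1 := by omega
  rw [hKt, pvSeg]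
  congr 2
  have h6 : K + 1 - (K - (t + 1) + 1) = t + 1 := by omega
  have h7 : K + 1 - (t + 1) = K - (t + 1) + 1 := by omega
  rw [h6]
  simp only [pvEnt, h7, Nat.add_sub_cancel]
  simp [pvE, getErosionA]

theorem pv_body_top {depth : Int} (K : Nat) :
    pvABody depth ((K : Int) + 1) (PySem.Dict.mk (pvUpTo depth K)) ((K : Int) + 1)
      = PySem.Dict.mk (pvUpTo depth K ++ pvSeg depth (K + 1) 0) := by
  have hfresh : (PySem.Dict.mk (pvUpTo depth K)).contains ((K : Int) + 1, (K : Int) + 1 - ((K : Int) + 1)) = false := by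
    rw [PySem.Dict.contains_eq_isSome_get?, get?_upTo_none]
    · rfl
    · intro x y hxy h
      simp only [Prod.mk.injEq] at h
      omega
  simp only [pvABody]
  rw [if_neg (by omega : ¬ ((K : Int) + 1 = 0)), if_pos (sub_self ((K : Int) + 1))]
  simp only [PySem.Dict.setdefault, hfresh, if_neg (Bool.false_ne_true)]
  simp only [PySem.Dict.mk.injEq, pvSeg]
  congr 2
  simp [pvEnt, Nat.sub_self]
  simp [pvE, getErosionA]

theorem pvA_diag_aux {depth : Int} (K : Nat) :
    ∀ t : Nat, t ≤ K →
      (PySem.List.pyRange (t : Int) (-1) (-1)).foldl (pvABody depth ((K : Int) + 1))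
          (PySem.Dict.mk (pvUpTo depth K ++ pvSeg depth (K + 1) (K - t)))
        = PySem.Dict.mk (pvUpTo depth (K + 1)) := by
  intro t
  induction t with
  | zero =>
    intro _
    rw [show ((0 : Nat) : Int) = 0 from rfl]
    rw [PySem.List.pyRange_neg_one_cons (by norm_num), List.foldl_cons]
    rw [show (0 : Int) - 1 = -1 from by ring, PySem.List.pyRange_neg_one_eq_nil le_rfl, List.foldl_nil]
    rw [Nat.sub_zero, pv_body_zero]
  | succ t ih =>
    intro ht
    rw [show ((t + 1 : Nat) : Int) = (t : Int) + 1 from by push_cast; ring]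
    rw [PySem.List.pyRange_neg_one_cons (by omega), List.foldl_cons]
    rw [show (t : Int) + 1 - 1 = ((t : Nat) : Int) from by ring]
    rw [pv_body_succ K t ht]
    exact ih (by omega)

theorem pvA_diag {depth : Int} (K : Nat) :
    (PySem.List.pyRange ((K : Int) + 1) (-1) (-1)).foldl (pvABody depth ((K : Int) + 1)) (PySem.Dict.mk (pvUpTo depth K))
      = PySem.Dict.mk (pvUpTo depth (K + 1)) := by
  rw [PySem.List.pyRange_neg_one_cons (by omega), List.foldl_cons, pv_body_top]
  rw [show (K : Int) + 1 - 1 = ((K : Nat) : Int) from by ring]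
  have := pvA_diag_aux (depth := depth) K K le_rfl
  rw [Nat.sub_self] at this
  exact this

theorem contains_upTo_true {depth : Int} {K a b : Nat} (h : a + b ≤ K) :
    (PySem.Dict.mk (pvUpTo depth K)).contains ((a : Int), (b : Int)) = true := by
  rw [PySem.Dict.contains_eq_isSome_get?, get?_upTo h]
  rfl

theorem contains_upTo_false {depth : Int} {K a b : Nat} (h : K < a + b) :
    (PySem.Dict.mk (pvUpTo depth K)).contains ((a : Int), (b : Int)) = false := by
  rw [PySem.Dict.contains_eq_isSome_get?, get?_upTo_none]
  · rfl
  · intro x y hxy hne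
    simp only [Prod.mk.injEq, Nat.cast_inj] at hne
    omega

theorem pvA_loop {depth : Int} (a b : Nat) :
    ∀ fuel K : Nat, a + b ≤ K + fuel →
      pvALoop ((a : Int), (b : Int)) depth fuel ((K : Int) + 1) (PySem.Dict.mk (pvUpTo depth K))
        = PySem.Dict.mk (pvUpTo depth (max K (a + b))) := by
  intro fuel
  induction fuel with
  | zero =>
    intro K h
    rw [pvALoop, Nat.max_eq_left (by omega)]
  | succ fuel ih =>
    intro K h
    rw [pvALoop]
    by_cases hc : a + b ≤ K
    · rw [if_pos (contains_upTo_true hc), Nat.max_eq_left hc]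
    · rw [if_neg (by rw [contains_upTo_false (by omega)]; exact Bool.false_ne_true)]
      rw [pvA_diag]
      rw [show (K : Int) + 1 + 1 = (((K + 1 : Nat)) : Int) + 1 from by push_cast; ring]
      rw [ih (K + 1) (by omega)]
      rw [Nat.max_eq_right (by omega), Nat.max_eq_right (by omega)]

theorem pvA_value (a b : Nat) (depth : Int) :
    generateErosions ((a : Int), (b : Int)) depth
      = ((pvUpTo depth (a + b)).map
          (fun p => if p.1 == ((a : Int), (b : Int)) then (((a : Int), (b : Int)), getErosionA 0 depth) else p)).map
          (fun p => (p.1.1, p.1.2, p.2)) := by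
  unfold generateErosions
  have hm0 : (PySem.Dict.empty : PySem.Dict (Int × Int) Int).setdefault (0, 0) (getErosionA 0 depth)
      = PySem.Dict.mk (pvUpTo depth 0) := by
    simp only [PySem.Dict.setdefault, PySem.Dict.contains_empty, Bool.false_eq_true, if_neg, pvUpTo, pvEnt]
    simp [PySem.Dict.empty, getErosionA, pvE]
  have hfuel : (((a : Int), (b : Int)).1 + ((a : Int), (b : Int)).2).toNat + 1 = a + b + 1 := by
    simp; omega
  rw [hm0, hfuel]
  show List.map (fun p => (p.1.1, p.1.2, p.2))
      ((pvALoop ((a : Int), (b : Int)) depth (a + b + 1) 1 (PySem.Dict.mk (pvUpTo depth 0))).insert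
        ((a : Int), (b : Int)) (getErosionA 0 depth)).items = _
  rw [show (1 : Int) = ((0 : Nat) : Int) + 1 from by norm_num]
  rw [pvA_loop a b (a + b + 1) 0 (by omega), Nat.max_eq_right (Nat.zero_le _)]
  have hins : (PySem.Dict.mk (pvUpTo depth (a + b))).insert ((a : Int), (b : Int)) (getErosionA 0 depth)
      = PySem.Dict.mk ((pvUpTo depth (a + b)).map
          (fun p => if p.1 == ((a : Int), (b : Int)) then (((a : Int), (b : Int)), getErosionA 0 depth) else p)) := by
    simp only [PySem.Dict.insert, contains_upTo_true (le_refl (a + b)), if_pos]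
  rw [hins]

-- ===== B-side lemmas =====

-- row x of B's grid, first n cells
def pvRow (depth : Int) (x n : Nat) : List Int := (List.range n).map (pvE depth x)

-- B's grid after the first m rows (full triangle for parameter D)
def pvGrid (depth : Int) (D m : Nat) : List (List Int) :=
  (List.range m).map (fun i => pvRow depth i (D - i + 1))

-- the value override B applies while emitting
def pvOv (target : Int × Int) (depth : Int) (p : (Int × Int) × Int) : (Int × Int) × Int :=
  (p.1, if p.1 = target then PySem.Int.mod depth 20183 else p.2)

theorem pyGet?_grid {depth : Int} {D m x : Nat} (h : x < m) :
    PySem.List.pyGet? (pvGrid depth D m) ((x : Nat) : Int) = some (pvRow depth x (D - x + 1)) := by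
  have hlen : x < (pvGrid depth D m).length := by simp [pvGrid]; omega
  rw [PySem.List.pyGet?_ofNat _ _ hlen]
  congr 1
  simp [pvGrid]

theorem pyGet?_row {depth : Int} {x n y : Nat} (h : y < n) :
    PySem.List.pyGet? (pvRow depth x n) ((y : Nat) : Int) = some (pvE depth x y) := by
  have hlen : y < (pvRow depth x n).length := by simp [pvRow]; omega
  rw [PySem.List.pyGet?_ofNat _ _ hlen]
  congr 1
  simp [pvRow]

theorem pvRow_succ (depth : Int) (x j : Nat) :
    pvRow depth x (j + 1) = pvRow depth x j ++ [pvE depth x j] := by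
  simp [pvRow, List.range_succ]

theorem pvB_row_body {depth : Int} {D x j : Nat} (hx : x ≤ D) (hj : j < D - x + 1) :
    pvBRowBody depth (pvGrid depth D x) ((x : Nat) : Int) (pvRow depth x j) ((j : Nat) : Int)
      = pvRow depth x (j + 1) := by
  rw [pvRow_succ]
  simp only [pvBRowBody]
  cases x with
  | zero =>
    rw [if_pos (by norm_num : ((0 : Nat) : Int) = 0)]
    cases j with
    | zero => simp [pvE]
    | succ j => simp [pvE]
  | succ s =>
    rw [if_neg (by omega : ¬ (((s + 1 : Nat) : Int) = 0))]
    cases j with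
    | zero =>
      rw [if_pos (by norm_num : ((0 : Nat) : Int) = 0)]
      simp only [pvE]
      congr 1
    | succ t =>
      rw [if_neg (by omega : ¬ (((t + 1 : Nat) : Int) = 0))]
      have hg : ((s + 1 : Nat) : Int) - 1 = ((s : Nat) : Int) := by omega
      rw [hg, pyGet?_grid (by omega : s < s + 1)]
      simp only [Option.getD_some]
      rw [pyGet?_row (by omega : t + 1 < D - s + 1)]
      have hr : ((t + 1 : Nat) : Int) - 1 = ((t : Nat) : Int) := by omega
      rw [hr, pyGet?_row (by omega : t < t + 1)]
      simp only [Option.getD_some, pvE]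

theorem pvB_row {depth : Int} {D x : Nat} (hx : x ≤ D) :
    ∀ j : Nat, j ≤ D - x + 1 →
      (PySem.List.pyRange 0 ((j : Nat) : Int) 1).foldl
          (pvBRowBody depth (pvGrid depth D x) ((x : Nat) : Int)) []
        = pvRow depth x j := by
  intro j
  induction j with
  | zero =>
    intro _
    rw [show ((0 : Nat) : Int) = 0 from rfl, PySem.List.pyRange_one_eq_nil le_rfl, List.foldl_nil]
    rfl
  | succ j ih =>
    intro hj
    rw [show ((j + 1 : Nat) : Int) = ((j : Nat) : Int) + 1 from by push_cast; ring]
    rw [PySem.List.pyRange_one_succ_right (by omega), List.foldl_append, ih (by omega),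
      List.foldl_cons, List.foldl_nil, pvB_row_body hx (by omega)]

theorem pvGrid_succ (depth : Int) (D m : Nat) :
    pvGrid depth D (m + 1) = pvGrid depth D m ++ [pvRow depth m (D - m + 1)] := by
  simp [pvGrid, List.range_succ]

theorem pvB_grid {depth : Int} {D : Nat} :
    ∀ m : Nat, m ≤ D + 1 →
      (PySem.List.pyRange 0 ((m : Nat) : Int) 1).foldl (pvBGridBody depth ((D : Nat) : Int)) []
        = pvGrid depth D m := by
  intro m
  induction m with
  | zero =>
    intro _
    rw [show ((0 : Nat) : Int) = 0 from rfl, PySem.List.pyRange_one_eq_nil le_rfl, List.foldl_nil]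
    rfl
  | succ m ih =>
    intro hm
    rw [show ((m + 1 : Nat) : Int) = ((m : Nat) : Int) + 1 from by push_cast; ring]
    rw [PySem.List.pyRange_one_succ_right (by omega), List.foldl_append, ih (by omega),
      List.foldl_cons, List.foldl_nil, pvGrid_succ]
    simp only [pvBGridBody, List.append_cancel_left_eq, List.cons.injEq, and_true]
    rw [show ((D : Nat) : Int) - ((m : Nat) : Int) + 1 = ((D - m + 1 : Nat) : Int) from by omega]
    exact pvB_row (by omega) (D - m + 1) le_rfl

theorem keys_map_ov (target : Int × Int) (depth : Int) (L : List ((Int × Int) × Int)) :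
    (L.map (pvOv target depth)).map (·.1) = L.map (·.1) := by
  rw [List.map_map]
  rfl

theorem pvSeg_eq_map {depth : Int} {k j : Nat} (hj : j ≤ k) :
    pvSeg depth k j = (List.range (j + 1)).map (fun i => pvEnt depth k (k - i)) := by
  induction j with
  | zero => simp [pvSeg, Nat.sub_zero]
  | succ j ih =>
    rw [pvSeg, ih (by omega)]
    conv_rhs => rw [List.range_succ]
    rw [List.map_append, List.map_singleton]

theorem pvB_diag {target : Int × Int} {depth : Int} {D K : Nat} (hK : K ≤ D) :
    pvBOutBody target depth (pvGrid depth D (D + 1))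
        (PySem.Dict.mk ((pvBelow depth K).map (pvOv target depth))) ((K : Nat) : Int)
      = PySem.Dict.mk ((pvUpTo depth K).map (pvOv target depth)) := by
  simp only [pvBOutBody]
  apply PySem.Dict.ext
  rw [PySem.Dict.items_foldl_insert_fresh _
      (fun x => (x, ((K : Nat) : Int) - x))
      (fun x => if (x, ((K : Nat) : Int) - x) = target then PySem.Int.mod depth 20183
        else (PySem.List.pyGet? ((PySem.List.pyGet? (pvGrid depth D (D + 1)) x).getD []) (((K : Nat) : Int) - x)).getD 0)
      _ ?fresh ?nodup]
  case fresh =>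
    intro a ha
    rw [PySem.List.mem_pyRange_neg_one] at ha
    obtain ⟨x, rfl⟩ : ∃ x : Nat, a = (x : Int) := ⟨a.toNat, by omega⟩
    have hx : x ≤ K := by omega
    have hnone : (PySem.Dict.mk ((pvBelow depth K).map (pvOv target depth))).get?
        ((x : Int), ((K : Nat) : Int) - (x : Int)) = none := by
      rw [PySem.Dict.get?_eq_none_iff_not_mem_keys]
      simp only [PySem.Dict.keys, keys_map_ov, List.mem_map]
      rintro ⟨q, hq, hk⟩
      obtain ⟨x', y', hxy', rfl⟩ := mem_pvBelow.mp hq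
      simp only [pvEnt, Nat.add_sub_cancel_left, Prod.mk.injEq, Nat.cast_inj] at hk
      omega
    rw [PySem.Dict.contains_eq_isSome_get?, hnone]
    rfl
  case nodup =>
    rw [PySem.List.pyRange_neg_one, List.map_map]
    refine List.Nodup.map ?_ (List.nodup_range)
    intro i i' hii
    simp only [Function.comp, Prod.mk.injEq] at hii
    omega
  · show (pvBelow depth K).map (pvOv target depth) ++ _ = _
    have hsplit : pvUpTo depth K = pvBelow depth K ++ pvSeg depth K K := by
      cases K with
      | zero => rfl
      | succ K => rfl
    rw [hsplit, List.map_append, List.append_cancel_left_eq]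
    rw [PySem.List.pyRange_neg_one, show ((K : Nat) : Int) - (-1) = ((K + 1 : Nat) : Int) from by omega,
      Int.toNat_natCast, List.map_map, pvSeg_eq_map (le_refl K), List.map_map]
    apply List.map_congr_left
    intro i hi
    rw [List.mem_range] at hi
    have hxi : K - i ≤ K := by omega
    have hc1 : ((K : Nat) : Int) - (i : Int) = ((K - i : Nat) : Int) := by omega
    have hc2 : ((K : Nat) : Int) - (((K - i : Nat)) : Int) = ((i : Nat) : Int) := by omega
    simp only [Function.comp, hc1, hc2]
    rw [pyGet?_grid (by omega : K - i < D + 1)]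
    simp only [Option.getD_some]
    rw [pyGet?_row (by omega : i < D - (K - i) + 1)]
    simp only [Option.getD_some, pvOv, pvEnt]
    rw [show K - (K - i) = i from by omega]

theorem pvB_out {target : Int × Int} {depth : Int} {D : Nat} :
    ∀ m : Nat, m ≤ D + 1 →
      (PySem.List.pyRange 0 ((m : Nat) : Int) 1).foldl
          (pvBOutBody target depth (pvGrid depth D (D + 1))) PySem.Dict.empty
        = PySem.Dict.mk ((pvBelow depth m).map (pvOv target depth)) := by
  intro m
  induction m with
  | zero =>
    intro _
    rw [show ((0 : Nat) : Int) = 0 from rfl, PySem.List.pyRange_one_eq_nil le_rfl, List.foldl_nil]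
    rfl
  | succ m ih =>
    intro hm
    rw [show ((m + 1 : Nat) : Int) = ((m : Nat) : Int) + 1 from by push_cast; ring]
    rw [PySem.List.pyRange_one_succ_right (by omega), List.foldl_append, ih (by omega),
      List.foldl_cons, List.foldl_nil]
    exact pvB_diag (by omega)

theorem pvB_value (a b : Nat) (depth : Int) :
    generateErosions_alt ((a : Int), (b : Int)) depth
      = ((pvUpTo depth (a + b)).map (pvOv ((a : Int), (b : Int)) depth)).map
          (fun p => (p.1.1, p.1.2, p.2)) := by
  unfold generateErosions_alt
  show List.map (fun p => (p.1.1, p.1.2, p.2))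
      ((PySem.List.pyRange 0 ((a : Int) + (b : Int) + 1) 1).foldl
        (pvBOutBody ((a : Int), (b : Int)) depth
          ((PySem.List.pyRange 0 ((a : Int) + (b : Int) + 1) 1).foldl
            (pvBGridBody depth ((a : Int) + (b : Int))) []))
        PySem.Dict.empty).items = _
  rw [show (a : Int) + (b : Int) + 1 = (((a + b + 1 : Nat)) : Int) from by push_cast; ring]
  rw [show ((a + b + 1 : Nat) : Int) = ((a + b : Nat) : Int) + 1 from by push_cast; ring]
  rw [show ((a : Int) + (b : Int)) = ((a + b : Nat) : Int) from by push_cast; ring]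
  rw [show ((a + b : Nat) : Int) + 1 = ((a + b + 1 : Nat) : Int) from by push_cast; ring]
  rw [pvB_grid (a + b + 1) le_rfl, pvB_out (a + b + 1) le_rfl]
  rfl

theorem pvAB (a b : Nat) (depth : Int) :
    generateErosions ((a : Int), (b : Int)) depth = generateErosions_alt ((a : Int), (b : Int)) depth := by
  rw [pvA_value, pvB_value]
  simp only [List.map_map]
  apply List.map_congr_left
  intro p hp
  simp only [Function.comp, pvOv]
  by_cases h : p.1 = ((a : Int), (b : Int))
  · simp [h, getErosionA]
  · simp [h]

-- ===== VERDICT (by name: the statement is the Claim_ definition above) =====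
theorem generateErosions_spec : Claim_equal_generateErosions := by
  intro target depth _ hpre
  obtain ⟨tx, ty⟩ := target
  obtain ⟨htx, hty⟩ := hpre
  obtain ⟨a, rfl⟩ : ∃ a : Nat, tx = (a : Int) := ⟨tx.toNat, by omega⟩
  obtain ⟨b, rfl⟩ : ∃ b : Nat, ty = (b : Int) := ⟨ty.toNat, by omega⟩
  show generateErosions ((a : Int), (b : Int)) depth = generateErosions_alt ((a : Int), (b : Int)) depth
  exact pvAB a b depth
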